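-- pv_equiv track=rewrite | github.com/Gabriel-Pacheco-Martinez/PrevenAI | backend/src/expander.py | filter_templates
-- ===== SOURCE A (Python) =====
-- from typing import List, Dict
--
-- def filter_templates(templates: List[Dict]) -> List[Dict]:
--     unique_prompts = set()
--     filtered = []
--     for t in templates:
--         prompt_text = t['prompt'].strip()
--         if prompt_text not in unique_prompts and len(t['response']) < 300:
--             filtered.append(t)
--             unique_prompts.add(prompt_text)
--     return filtered
-- ===== SOURCE B (Python) =====
-- from typing import List, Dict
--
-- def filter_templates(templates: List[Dict]) -> List[Dict]:
--     # Different algorithm: build, scanning backwards, a map from stripped prompt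
--     # to the SMALLEST index of a short-response template with that prompt (each
--     # overwrite moves the recorded index earlier); then keep exactly the
--     # templates that sit at their prompt's first qualifying index.
--     first = {}
--     for i, t in reversed(list(enumerate(templates))):
--         if len(t['response']) < 300:
--             first[t['prompt'].strip()] = i
--     return [t for i, t in enumerate(templates)
--             if len(t['response']) < 300
--             and first.get(t['prompt'].strip()) == i]
-- ===== Notes on version B (the rewrite author's own statement) =====
-- stated objective: alternative
-- what changed: Replaces the running seen-set with a first-qualifying-index map built in a backward pass (later writes overwrite, leaving the smallest index per stripped prompt), then keeps templates whose index equals their prompt's recorded first index; no membership set is maintained during output.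
import Mathlib
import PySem

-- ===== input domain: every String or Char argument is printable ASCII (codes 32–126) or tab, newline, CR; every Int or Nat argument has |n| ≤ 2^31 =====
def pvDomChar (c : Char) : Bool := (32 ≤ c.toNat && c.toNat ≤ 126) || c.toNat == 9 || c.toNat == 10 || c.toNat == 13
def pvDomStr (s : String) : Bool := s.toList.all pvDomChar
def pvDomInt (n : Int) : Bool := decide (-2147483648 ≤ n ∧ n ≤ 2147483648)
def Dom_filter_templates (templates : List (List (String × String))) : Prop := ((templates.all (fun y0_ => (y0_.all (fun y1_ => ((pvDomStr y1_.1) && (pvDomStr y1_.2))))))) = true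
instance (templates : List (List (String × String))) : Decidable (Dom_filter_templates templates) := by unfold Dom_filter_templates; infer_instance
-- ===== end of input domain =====

-- B replaces A's running seen-set with a first-qualifying-index map built in a backward pass,
-- keeping templates that sit at their prompt's first short-response index (alternative algorithm, same cost).

-- t[k] for the dict-as-association-list: first match (Pre_ guarantees the key exists)
def pvGetKey (t : List (String × String)) (k : String) : String :=
  ((t.find? (fun p => p.1 == k)).map (·.2)).getD ""

-- ===== PORT A =====
def filter_templates (templates : List (List (String × String))) : List (List (String × String)) :=
  (templates.foldl
    (fun (st : PySem.Set String × List (List (String × String))) t =>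
      let prompt_text := PySem.Str.strip (pvGetKey t "prompt")
      if PySem.Set.contains st.1 prompt_text = false ∧ PySem.Str.len (pvGetKey t "response") < 300
      then (PySem.Set.add st.1 prompt_text, st.2 ++ [t])
      else st)
    (PySem.Set.empty, [])).2

-- ===== PORT B =====
def filter_templates_alt (templates : List (List (String × String))) : List (List (String × String)) :=
  let e := PySem.List.enumerate templates 0
  let first := e.reverse.foldl
      (fun (d : PySem.Dict String Int) p =>
        if PySem.Str.len (pvGetKey p.2 "response") < 300
        then d.insert (PySem.Str.strip (pvGetKey p.2 "prompt")) p.1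
        else d)
      PySem.Dict.empty
  (e.filter (fun p =>
      decide (PySem.Str.len (pvGetKey p.2 "response") < 300) &&
      (first.get? (PySem.Str.strip (pvGetKey p.2 "prompt")) == some p.1))).map (·.2)

-- ===== PRECONDITION & SPEC =====
-- Pre_ excludes templates missing a 'prompt' or 'response' key, on which A raises KeyError.
def Pre_filter_templates (templates : List (List (String × String))) : Prop :=
  (templates.all (fun t => t.any (fun p => p.1 == "prompt") && t.any (fun p => p.1 == "response"))) = true
instance (templates : List (List (String × String))) : Decidable (Pre_filter_templates templates) := by
  unfold Pre_filter_templates; infer_instance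

def pvWitness_filter_templates : (List (List (String × String))) :=
  [[("prompt", " hi "), ("response", "ok")], [("prompt", "hi"), ("response", "ok2")]]

def Spec_filter_templates (templates : List (List (String × String))) (out : List (List (String × String))) : Prop := out = filter_templates_alt templates
instance (templates : List (List (String × String))) (out : List (List (String × String))) : Decidable (Spec_filter_templates templates out) := by unfold Spec_filter_templates; infer_instance

-- ===== CLAIM =====
def Claim_equal_filter_templates : Prop := ∀ (templates : List (List (String × String))), Dom_filter_templates templates → Pre_filter_templates templates → Spec_filter_templates templates (filter_templates templates)

-- ===== LEMMAS AND PROOFS =====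

-- B's dict over an already-enumerated list (for stating the lookup characterization)
def pvFirstOf (e : List (Int × List (String × String))) : PySem.Dict String Int :=
  e.reverse.foldl
    (fun (d : PySem.Dict String Int) p =>
      if PySem.Str.len (pvGetKey p.2 "response") < 300
      then d.insert (PySem.Str.strip (pvGetKey p.2 "prompt")) p.1
      else d)
    PySem.Dict.empty

-- get? of the backward-built map = index of the first forward qualifying occurrence
theorem pvFirstOf_get (e : List (Int × List (String × String))) (k : String) :
    (pvFirstOf e).get? k
    = ((e.filter (fun p => decide (PySem.Str.len (pvGetKey p.2 "response") < 300))).find?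
        (fun p => PySem.Str.strip (pvGetKey p.2 "prompt") == k)).map (·.1) := by
  unfold pvFirstOf
  rw [List.foldl_reverse]
  induction e with
  | nil => simp [PySem.Dict.get?, PySem.Dict.empty]
  | cons p rest ih =>
    simp only [List.foldr_cons, List.filter_cons]
    by_cases hs : PySem.Str.len (pvGetKey p.2 "response") < 300
    · rw [if_pos hs]
      simp only [decide_eq_true hs, if_pos]
      by_cases hk : k = PySem.Str.strip (pvGetKey p.2 "prompt")
      · subst hk
        rw [PySem.Dict.get?_insert_self]
        simp
      · rw [PySem.Dict.get?_insert_of_ne _ _ hk]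
        rw [ih]
        have hb : (PySem.Str.strip (pvGetKey p.2 "prompt") == k) = false := by
          simp; exact fun h => hk h.symm
        simp [hb]
    · rw [if_neg hs]
      simp only [decide_eq_false hs, Bool.false_eq_true, if_false]
      exact ih

theorem pv_contains_add (s : PySem.Set String) (x k : String) :
    PySem.Set.contains (PySem.Set.add s x) k = (PySem.Set.contains s k || k == x) := by
  simp only [PySem.Set.contains, PySem.Set.add]
  split_ifs with h
  · by_cases hk : k = x
    · subst hk; simp_all [List.contains_eq_mem]
    · simp [List.contains_eq_mem, hk]
  · simp [List.contains_eq_mem]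
    by_cases hk : k = x <;> simp [hk]

-- main loop correspondence: A's fold over a suffix, with seen = the stripped prompts of
-- the short-response items of the prefix, equals B's index-equality filter on the suffix
theorem pv_main (ts : List (List (String × String))) :
    ∀ (P : List (List (String × String))) (seen : PySem.Set String)
      (acc : List (List (String × String))),
    (∀ k, PySem.Set.contains seen k = true ↔
        ∃ p ∈ P, PySem.Str.len (pvGetKey p "response") < 300 ∧
          PySem.Str.strip (pvGetKey p "prompt") = k) →
    (ts.foldl
      (fun (st : PySem.Set String × List (List (String × String))) t =>
        let prompt_text := PySem.Str.strip (pvGetKey t "prompt")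
        if PySem.Set.contains st.1 prompt_text = false ∧ PySem.Str.len (pvGetKey t "response") < 300
        then (PySem.Set.add st.1 prompt_text, st.2 ++ [t])
        else st)
      (seen, acc)).2
    = acc ++ ((PySem.List.enumerate ts (P.length : Int)).filter (fun p =>
        decide (PySem.Str.len (pvGetKey p.2 "response") < 300) &&
        ((pvFirstOf (PySem.List.enumerate (P ++ ts) 0)).get?
            (PySem.Str.strip (pvGetKey p.2 "prompt")) == some p.1))).map (·.2) := by
  induction ts with
  | nil => intro P seen acc _; simp [PySem.List.enumerate]
  | cons t rest ih =>
    intro P seen acc hseen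
    simp only [List.foldl_cons, PySem.List.enumerate_cons, List.filter_cons]
    have hget : (pvFirstOf (PySem.List.enumerate (P ++ t :: rest) 0)).get?
          (PySem.Str.strip (pvGetKey t "prompt"))
        = (Option.or
            (((PySem.List.enumerate P 0).filter
              (fun (p : Int × List (String × String)) => decide (PySem.Str.len (pvGetKey p.2 "response") < 300))).find?
            (fun (p : Int × List (String × String)) => PySem.Str.strip (pvGetKey p.2 "prompt") == PySem.Str.strip (pvGetKey t "prompt")))
            (((PySem.List.enumerate (t :: rest) ((P.length : Int))).filter
              (fun (p : Int × List (String × String)) => decide (PySem.Str.len (pvGetKey p.2 "response") < 300))).find?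
            (fun (p : Int × List (String × String)) => PySem.Str.strip (pvGetKey p.2 "prompt") == PySem.Str.strip (pvGetKey t "prompt")))).map (·.1) := by
      rw [pvFirstOf_get, PySem.List.enumerate_append, List.filter_append, List.find?_append]
      norm_num
    have hreidx : ∀ (s : PySem.Set String) (a : List (List (String × String))),
        (∀ k, PySem.Set.contains s k = true ↔
          ∃ p ∈ P ++ [t], PySem.Str.len (pvGetKey p "response") < 300 ∧
            PySem.Str.strip (pvGetKey p "prompt") = k) →
        (rest.foldl
          (fun (st : PySem.Set String × List (List (String × String))) t =>
            let prompt_text := PySem.Str.strip (pvGetKey t "prompt")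
            if PySem.Set.contains st.1 prompt_text = false ∧ PySem.Str.len (pvGetKey t "response") < 300
            then (PySem.Set.add st.1 prompt_text, st.2 ++ [t])
            else st)
          (s, a)).2
        = a ++ ((PySem.List.enumerate rest ((P.length : Int) + 1)).filter (fun p =>
            decide (PySem.Str.len (pvGetKey p.2 "response") < 300) &&
            ((pvFirstOf (PySem.List.enumerate (P ++ t :: rest) 0)).get?
                (PySem.Str.strip (pvGetKey p.2 "prompt")) == some p.1))).map (·.2) := by
      intro s a hs
      have := ih (P ++ [t]) s a hs
      simpa [List.append_assoc] using this
    by_cases hs : PySem.Str.len (pvGetKey t "response") < 300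
    · by_cases hc : PySem.Set.contains seen (PySem.Str.strip (pvGetKey t "prompt")) = true
      · -- already seen: both skip this item
        have hne : ((pvFirstOf (PySem.List.enumerate (P ++ t :: rest) 0)).get?
            (PySem.Str.strip (pvGetKey t "prompt")) == some ((P.length : Int))) = false := by
          obtain ⟨p0, hp0P, hp0s, hp0k⟩ := (hseen _).1 hc
          obtain ⟨j, hj⟩ : ∃ j, ((PySem.List.enumerate P 0).filter
              (fun p => decide (PySem.Str.len (pvGetKey p.2 "response") < 300))).find?
              (fun p => PySem.Str.strip (pvGetKey p.2 "prompt") == PySem.Str.strip (pvGetKey t "prompt")) = some j := by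
            have hmem : ∃ x ∈ (PySem.List.enumerate P 0).filter
                (fun p => decide (PySem.Str.len (pvGetKey p.2 "response") < 300)),
                (PySem.Str.strip (pvGetKey x.2 "prompt") == PySem.Str.strip (pvGetKey t "prompt")) = true := by
              obtain ⟨m, hm, hPm⟩ := List.mem_iff_getElem.1 hp0P
              refine ⟨((m : Int), P[m]), ?_, by simp [hPm, hp0k]⟩
              simp only [List.mem_filter]
              exact ⟨(PySem.List.mem_enumerate_iff _ _ _).2 ⟨m, hm, by simp⟩,
                by simpa [hPm] using decide_eq_true hp0s⟩
            exact Option.isSome_iff_exists.1 (List.find?_isSome.2 hmem)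
          have hjlt : j.1 < (P.length : Int) := by
            have hmem' := (List.mem_filter.1 (List.mem_of_find?_eq_some hj)).1
            obtain ⟨m, hm, hpe⟩ := (PySem.List.mem_enumerate_iff _ _ _).1 hmem'
            subst hpe; simpa using hm
          rw [hget, hj]
          simp only [Option.some_or, Option.map_some]
          simp only [beq_eq_false_iff_ne, ne_eq, Option.some.injEq]
          omega
        rw [if_neg (by intro h; rw [h.1] at hc; simp at hc)]
        have hnc : ¬ ((decide (PySem.Str.len (pvGetKey t "response") < 300) &&
            ((pvFirstOf (PySem.List.enumerate (P ++ t :: rest) 0)).get?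
              (PySem.Str.strip (pvGetKey t "prompt")) == some ((P.length : Int)))) = true) := by
          intro h
          simp only [Bool.and_eq_true] at h
          rw [hne] at h
          simp at h
        rw [if_neg hnc]
        exact hreidx seen acc (by
          intro k
          rw [hseen k]
          constructor
          · rintro ⟨p, hp, h1, h2⟩; exact ⟨p, by simp [hp], h1, h2⟩
          · rintro ⟨p, hp, h1, h2⟩
            rcases List.mem_append.1 hp with h' | h'
            · exact ⟨p, h', h1, h2⟩
            · simp only [List.mem_singleton] at h'; subst h'
              obtain ⟨q, hq, hq1, hq2⟩ := (hseen _).1 hc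
              exact ⟨q, hq, hq1, by rw [hq2, h2]⟩)
      · -- new prompt: both keep this item
        have hcf : PySem.Set.contains seen (PySem.Str.strip (pvGetKey t "prompt")) = false := by
          simpa using hc
        have hnone : ((PySem.List.enumerate P 0).filter
            (fun p => decide (PySem.Str.len (pvGetKey p.2 "response") < 300))).find?
            (fun p => PySem.Str.strip (pvGetKey p.2 "prompt") == PySem.Str.strip (pvGetKey t "prompt")) = none := by
          rw [List.find?_eq_none]
          intro x hx
          obtain ⟨m, hm, hpe⟩ := (PySem.List.mem_enumerate_iff _ _ _).1 (List.mem_filter.1 hx).1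
          have hxs : PySem.Str.len (pvGetKey x.2 "response") < 300 := by
            simpa using (List.mem_filter.1 hx).2
          intro hkx
          have hex : ∃ p ∈ P, PySem.Str.len (pvGetKey p "response") < 300 ∧
              PySem.Str.strip (pvGetKey p "prompt") = PySem.Str.strip (pvGetKey t "prompt") :=
            ⟨x.2, by simp [hpe], hxs, by simpa using hkx⟩
          rw [(hseen _).2 hex] at hcf
          simp at hcf
        have hgeta : (pvFirstOf (PySem.List.enumerate (P ++ t :: rest) 0)).get?
            (PySem.Str.strip (pvGetKey t "prompt")) = some ((P.length : Int)) := by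
          rw [hget, hnone, PySem.List.enumerate_cons, List.filter_cons, Option.none_or]
          rw [if_pos (decide_eq_true hs)]
          simp
        rw [if_pos ⟨hcf, hs⟩]
        have hcond : (decide (PySem.Str.len (pvGetKey t "response") < 300) &&
            ((pvFirstOf (PySem.List.enumerate (P ++ t :: rest) 0)).get?
              (PySem.Str.strip (pvGetKey t "prompt")) == some ((P.length : Int)))) = true := by
          rw [hgeta, decide_eq_true hs]
          simp
        rw [if_pos hcond]
        rw [hreidx (PySem.Set.add seen (PySem.Str.strip (pvGetKey t "prompt"))) (acc ++ [t]) (by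
          intro k
          rw [pv_contains_add]
          constructor
          · intro h
            rcases Bool.or_eq_true_iff.1 h with h' | h'
            · obtain ⟨p, hp, h1, h2⟩ := (hseen k).1 h'
              exact ⟨p, by simp [hp], h1, h2⟩
            · exact ⟨t, by simp, hs, (beq_iff_eq.1 h').symm⟩
          · rintro ⟨p, hp, h1, h2⟩
            rcases List.mem_append.1 hp with h' | h'
            · exact Bool.or_eq_true_iff.2 (Or.inl ((hseen k).2 ⟨p, h', h1, h2⟩))
            · simp only [List.mem_singleton] at h'; subst h'
              exact Bool.or_eq_true_iff.2 (Or.inr (by simp [h2])))]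
        simp
    · -- long response: both skip this item
      rw [if_neg (fun h => hs h.2)]
      have hnc : ¬ ((decide (PySem.Str.len (pvGetKey t "response") < 300) &&
          ((pvFirstOf (PySem.List.enumerate (P ++ t :: rest) 0)).get?
            (PySem.Str.strip (pvGetKey t "prompt")) == some ((P.length : Int)))) = true) := by
        intro h
        simp only [Bool.and_eq_true] at h
        exact hs (of_decide_eq_true h.1)
      rw [if_neg hnc]
      exact hreidx seen acc (by
        intro k
        rw [hseen k]
        constructor
        · rintro ⟨p, hp, h1, h2⟩; exact ⟨p, by simp [hp], h1, h2⟩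
        · rintro ⟨p, hp, h1, h2⟩
          rcases List.mem_append.1 hp with h' | h'
          · exact ⟨p, h', h1, h2⟩
          · simp only [List.mem_singleton] at h'; subst h'; exact absurd h1 hs)

-- ===== VERDICT =====
theorem filter_templates_spec : Claim_equal_filter_templates := by
  intro templates _ _
  unfold Spec_filter_templates filter_templates filter_templates_alt
  have h := pv_main templates [] PySem.Set.empty []
    (by intro k; simp [PySem.Set.contains, PySem.Set.empty, List.contains_eq_mem])
  simp only [List.nil_append, Nat.cast_zero, List.length_nil] at h
  rw [h]
  rfl
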